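-- pv_equiv track=rewrite | github.com/applepythonvn/FILE-PYTHON | APP/AppBoiTinhDuyen/boitinhduyen.py | boi_tinh_yeu
-- ===== SOURCE A (Python) =====
-- def boi_tinh_yeu(ten_nam, ten_nu):
-- 	#Chuyển thành viết thường
-- 	ten_nam=ten_nam.lower()
-- 	ten_nu=ten_nu.lower()
-- 	#Chính
-- 	dem=0
-- 	#Chuyển bảng chữ cái thành số
-- 	for bang_chu_cai in range(ord('a'), ord('z')+1):
-- 		#tổng 2 số trùng nhau từ tên
-- 		if (chr(bang_chu_cai) in ten_nam) and (chr(bang_chu_cai) in ten_nu):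
-- 			#Biến đểm để đếm các sỗ được lấy từ tên nam và tên nữ trùng nhau
-- 			dem=dem+1
--
-- 	#Bói
-- 	if dem==0:
-- 		ket_qua= "Không hợp nhau"
-- 	elif dem <= 3:
-- 		ket_qua= "Bạn bè"
-- 	elif dem >= 4:
-- 		ket_qua="Hợp nhau"
-- 	else:
-- 		ket_qua="Lỗi"
-- 	return ket_qua
-- ===== SOURCE B (Python) =====
-- def boi_tinh_yeu(ten_nam, ten_nu):
--     def mask(s):
--         m = 0
--         for c in s.lower():
--             o = ord(c)
--             if 97 <= o <= 122:
--                 m |= 1 << (o - 97)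
--         return m
--     m = mask(ten_nam) & mask(ten_nu)
--     dem = 0
--     while m:
--         dem += m & 1
--         m >>= 1
--     if dem == 0:
--         return "Không hợp nhau"
--     elif dem <= 3:
--         return "Bạn bè"
--     else:
--         return "Hợp nhau"
-- ===== Notes on version B (the rewrite author's own statement) =====
-- stated objective: alternative
-- what changed: Replaces the 26-iteration alphabet loop with two substring-membership tests per letter by a bitmask algorithm: one pass over each name builds a 26-bit integer of the letters it contains, and the shared-letter count is the popcount of the bitwise AND of the two masks; the classification chain is unchanged.
import Mathlib
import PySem

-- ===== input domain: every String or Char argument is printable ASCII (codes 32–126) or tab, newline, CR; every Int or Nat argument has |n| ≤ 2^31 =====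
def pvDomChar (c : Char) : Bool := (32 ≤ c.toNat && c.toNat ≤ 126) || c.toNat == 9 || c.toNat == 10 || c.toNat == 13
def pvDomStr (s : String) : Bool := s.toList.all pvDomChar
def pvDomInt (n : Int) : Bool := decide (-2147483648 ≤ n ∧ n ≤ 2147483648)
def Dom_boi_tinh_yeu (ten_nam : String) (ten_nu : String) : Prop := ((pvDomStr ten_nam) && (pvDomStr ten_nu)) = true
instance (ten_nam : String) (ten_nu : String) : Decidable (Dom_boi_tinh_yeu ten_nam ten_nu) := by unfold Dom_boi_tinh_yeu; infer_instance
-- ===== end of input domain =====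

-- B replaces A's fixed 26-letter alphabet scan (substring membership per letter) with a
-- bitmask algorithm: one pass over each name builds a 26-bit letter mask, and the shared
-- count is the popcount of their bitwise AND (alternative algorithm; same result).


-- ===== PORT A =====
def boi_tinh_yeu (ten_nam : String) (ten_nu : String) : String :=
  let nam := PySem.Chars.lower ten_nam.toList
  let nu := PySem.Chars.lower ten_nu.toList
  -- for bang_chu_cai in range(ord('a'), ord('z')+1): if chr(..) in nam and chr(..) in nu: dem += 1
  let dem : Int := (PySem.List.pyRange ('a'.toNat : Int) (('z'.toNat : Int) + 1) 1).foldl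
    (fun dem b =>
      if nam.contains (Char.ofNat b.toNat) && nu.contains (Char.ofNat b.toNat) then dem + 1
      else dem) 0
  if dem = 0 then "Không hợp nhau"
  else if dem ≤ 3 then "Bạn bè"
  else if dem ≥ 4 then "Hợp nhau"
  else "Lỗi"

-- ===== PORT B =====
-- helper `mask(s)`: m = 0; for c in s.lower(): o = ord(c); if 97 <= o <= 122: m |= 1 << (o - 97)
def pvMask (s : String) : Nat :=
  (PySem.Chars.lower s.toList).foldl
    (fun m c => if 97 ≤ c.toNat && c.toNat ≤ 122 then m ||| (1 <<< (c.toNat - 97)) else m) 0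

-- the popcount loop: while m: dem += m & 1; m >>= 1
def pvPopCnt : Nat → Nat
  | 0 => 0
  | m + 1 => ((m + 1) % 2) + pvPopCnt ((m + 1) / 2)
decreasing_by omega

def boi_tinh_yeu_alt (ten_nam : String) (ten_nu : String) : String :=
  let dem := pvPopCnt (pvMask ten_nam &&& pvMask ten_nu)
  if dem = 0 then "Không hợp nhau"
  else if dem ≤ 3 then "Bạn bè"
  else "Hợp nhau"

-- ===== PRECONDITION & SPEC =====
def Spec_boi_tinh_yeu (ten_nam : String) (ten_nu : String) (out : String) : Prop := out = boi_tinh_yeu_alt ten_nam ten_nu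
instance (ten_nam : String) (ten_nu : String) (out : String) : Decidable (Spec_boi_tinh_yeu ten_nam ten_nu out) := by unfold Spec_boi_tinh_yeu; infer_instance

-- ===== CLAIM (what is proved, stated in full; the proofs are below) =====
def Claim_equal_boi_tinh_yeu : Prop := ∀ (ten_nam : String) (ten_nu : String), Dom_boi_tinh_yeu ten_nam ten_nu → Spec_boi_tinh_yeu ten_nam ten_nu (boi_tinh_yeu ten_nam ten_nu)

-- ===== LEMMAS AND PROOFS =====

def pvCharList : List Char :=
  ['a','b','c','d','e','f','g','h','i','j','k','l','m',
   'n','o','p','q','r','s','t','u','v','w','x','y','z']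

def pvCodeList : List Int :=
  [97,98,99,100,101,102,103,104,105,106,107,108,109,
   110,111,112,113,114,115,116,117,118,119,120,121,122]

lemma pv_foldl_count (p : Int → Bool) :
    ∀ (l : List Int) (n : Int),
      l.foldl (fun d b => if p b then d + 1 else d) n = n + ((l.filter p).length : Int) := by
  intro l
  induction l with
  | nil => intro n; simp
  | cons x xs ih =>
      intro n
      by_cases h : p x <;> simp [List.foldl, h, ih]
      omega

-- bit i of the mask fold says whether the letter chr(97+i) occurs in the char list
lemma pv_mask_testBit (i : Nat) (hi : i < 26) :
    ∀ (l : List Char) (m : Nat),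
      (l.foldl (fun m c => if 97 ≤ c.toNat && c.toNat ≤ 122 then m ||| (1 <<< (c.toNat - 97)) else m) m).testBit i
        = (m.testBit i || l.contains (Char.ofNat (97 + i))) := by
  intro l
  induction l with
  | nil => intro m; simp
  | cons c cs ih =>
      intro m
      have hX : (Char.ofNat (97 + i)).toNat = 97 + i := by
        interval_cases i <;> decide
      have hceq : (Char.ofNat (97 + i) == c) = decide (c.toNat = 97 + i) := by
        by_cases h : c.toNat = 97 + i
        · have hc : c = Char.ofNat (97 + i) := by
            apply Char.ext
            apply UInt32.toNat_inj.mp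
            show c.toNat = (Char.ofNat (97 + i)).toNat
            rw [hX]; exact h
          simp [hc, hX]
        · have hne : ¬ (Char.ofNat (97 + i) = c) := by
            intro he; exact h (by rw [← he, hX])
          simp [hne, h]
      have hstep :
          (if 97 ≤ c.toNat && c.toNat ≤ 122 then m ||| (1 <<< (c.toNat - 97)) else m).testBit i
            = (m.testBit i || decide (c.toNat = 97 + i)) := by
        by_cases hc : (97 ≤ c.toNat && c.toNat ≤ 122) = true
        · rw [if_pos hc, Nat.testBit_or, Nat.shiftLeft_eq, one_mul, Nat.testBit_two_pow]
          have hc' : 97 ≤ c.toNat ∧ c.toNat ≤ 122 := by simpa using hc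
          have hiff : (c.toNat - 97 = i) ↔ (c.toNat = 97 + i) := by omega
          simp [hiff]
        · rw [if_neg hc]
          have hne : ¬ (c.toNat = 97 + i) := by
            intro he; apply hc; simp; omega
          simp [hne]
      simp only [List.foldl_cons, ih, List.contains_cons, hceq, hstep, Bool.or_assoc]

lemma pv_mask_lt :
    ∀ (l : List Char) (m : Nat), m < 2 ^ 26 →
      (l.foldl (fun m c => if 97 ≤ c.toNat && c.toNat ≤ 122 then m ||| (1 <<< (c.toNat - 97)) else m) m) < 2 ^ 26 := by
  intro l
  induction l with
  | nil => intro m hm; simpa using hm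
  | cons c cs ih =>
      intro m hm
      simp only [List.foldl_cons]
      apply ih
      by_cases hc : (97 ≤ c.toNat && c.toNat ≤ 122) = true
      · simp only [hc]
        apply Nat.or_lt_two_pow hm
        rw [Nat.shiftLeft_eq, one_mul]
        have hc' : 97 ≤ c.toNat ∧ c.toNat ≤ 122 := by simpa using hc
        exact Nat.pow_lt_pow_right (by omega) (by omega)
      · simpa [hc] using hm

lemma pv_popCnt_eq :
    ∀ (k : Nat) (m : Nat), m < 2 ^ k →
      pvPopCnt m = ((List.range k).filter m.testBit).length := by
  intro k
  induction k with
  | zero =>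
      intro m hm
      have : m = 0 := by omega
      simp [this, pvPopCnt]
  | succ k ih =>
      intro m hm
      match m with
      | 0 =>
          have hnil : List.filter (Nat.testBit 0) (List.range (k + 1)) = [] :=
            List.filter_eq_nil_iff.mpr (by intro a _; simp [Nat.zero_testBit])
          simp [pvPopCnt, hnil]
      | n + 1 =>
          rw [pvPopCnt.eq_2]
          have hdiv : (n + 1) / 2 < 2 ^ k := by
            have h2 : 2 ^ (k + 1) = 2 ^ k * 2 := by ring
            rw [h2] at hm
            omega
          rw [ih _ hdiv, List.range_succ_eq_map, List.filter_cons]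
          have hmap : List.filter (Nat.testBit (n+1)) (List.map Nat.succ (List.range k))
              = List.map Nat.succ (List.filter ((Nat.testBit (n+1)) ∘ Nat.succ) (List.range k)) :=
            List.filter_map
          rw [hmap]
          have hcomp : ((Nat.testBit (n+1)) ∘ Nat.succ) = (Nat.testBit ((n+1)/2)) := by
            funext j
            simp [Function.comp, Nat.testBit_add_one]
          rw [hcomp]
          by_cases h0 : (n + 1).testBit 0 = true
          · have h1 : (n + 1) % 2 = 1 := by
              have h := h0; rw [Nat.testBit_zero] at h; simpa using h
            simp [h0, h1]
            omega
          · have h1 : (n + 1) % 2 = 0 := by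
              have h := h0; rw [Nat.testBit_zero] at h; simp at h; omega
            simp [h0, h1]

theorem boi_tinh_yeu_spec : Claim_equal_boi_tinh_yeu := by
  intro ten_nam ten_nu _
  unfold Spec_boi_tinh_yeu boi_tinh_yeu boi_tinh_yeu_alt pvMask
  set nam := PySem.Chars.lower ten_nam.toList with hnam
  set nu := PySem.Chars.lower ten_nu.toList with hnu
  have hrange : PySem.List.pyRange ('a'.toNat : Int) (('z'.toNat : Int) + 1) 1 = pvCodeList := by
    decide
  have hmapChars : (List.range 26).map (fun i => Char.ofNat (97 + i)) = pvCharList := by decide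
  have hmapCodes : (List.range 26).map (fun i : Nat => ((97 + i : Nat) : Int)) = pvCodeList := by decide
  -- A's count as a count over range 26
  have hA :
      (PySem.List.pyRange ('a'.toNat : Int) (('z'.toNat : Int) + 1) 1).foldl
        (fun dem b =>
          if nam.contains (Char.ofNat b.toNat) && nu.contains (Char.ofNat b.toNat) then dem + 1
          else dem) (0 : Int)
      = (((List.range 26).filter
            (fun i => nam.contains (Char.ofNat (97 + i)) && nu.contains (Char.ofNat (97 + i)))).length : Int) := by
    rw [hrange, pv_foldl_count (fun b : Int => nam.contains (Char.ofNat b.toNat) && nu.contains (Char.ofNat b.toNat)) pvCodeList 0]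
    rw [← hmapCodes, List.filter_map, List.length_map]
    simp only [Function.comp_def, Int.toNat_natCast]
    omega
  -- B's count equals the same count over range 26
  set f := fun (m : Nat) (c : Char) =>
    if 97 ≤ c.toNat && c.toNat ≤ 122 then m ||| (1 <<< (c.toNat - 97)) else m with hf
  have hmlt : ∀ l : List Char, l.foldl f 0 < 2 ^ 26 := fun l => pv_mask_lt l 0 (by norm_num)
  have handlt : (nam.foldl f 0) &&& (nu.foldl f 0) < 2 ^ 26 :=
    lt_of_le_of_lt Nat.and_le_left (hmlt nam)
  have hB : pvPopCnt ((nam.foldl f 0) &&& (nu.foldl f 0))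
      = ((List.range 26).filter
          (fun i => nam.contains (Char.ofNat (97 + i)) && nu.contains (Char.ofNat (97 + i)))).length := by
    rw [pv_popCnt_eq 26 _ handlt]
    congr 1
    apply List.filter_congr
    intro i hi
    have hi26 : i < 26 := List.mem_range.mp hi
    rw [Nat.testBit_and, pv_mask_testBit i hi26 nam 0, pv_mask_testBit i hi26 nu 0,
      Nat.zero_testBit]
    simp
  simp only [hA, hB]
  set n := ((List.range 26).filter
      (fun i => nam.contains (Char.ofNat (97 + i)) && nu.contains (Char.ofNat (97 + i)))).length
  split_ifs <;> first | rfl | omega
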